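-- pv_equiv track=rewrite | github.com/ThinhNgVhust/BigOBlue | Orange/W7_Number_Theory/6_Pashmak and Parmida's problem.py | solve
-- ===== SOURCE A (Python) =====
-- def solve(A, B):
--     if len(A) <= 1: return 0
--     mid = len(A) // 2
--     ans = 0
--     A1 = A[:mid]
--     A2 = A[mid:]
--     B1 = B[:mid]
--     B2 = B[mid:]
--     if len(A1) >= 1 and len(B1) >= 1:
--         ans = solve(A1, B1) + solve(A2, B2)
--     else:
--         A.sort()
--         B.sort()
--     len_A = len(A1)
--     index_A = 0
--     len_B = len(B2)
--     index_B = 0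
--
--     for k in range(len_A + len_B):
--
--         if A1[index_A] <= B2[index_B]:
--
--             index_A += 1
--             if index_A == len_A:
--                 merge(A1, A2, A)
--                 merge(B1, B2, B)
--
--                 return ans
--         else:
--             index_B += 1
--             ans += (len_A - index_A)
--
--             if index_B == len_B:
--                 merge(A1, A2, A)
--                 merge(B1, B2, B)
--                 return ans
--
-- def merge(A1, A2, dest):
--     i = 0
--     j = 0
--     while i < len(A1) and j < len(A2):
--         if A1[i] < A2[j]:
--             dest[i + j] = A1[i]
--             i += 1
--         else:
--             dest[i + j] = A2[j]
--             j += 1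
--     while i < len(A1):
--         dest[i + j] = A1[i]
--         i += 1
--
--     while j < len(A2):
--         dest[i + j] = A2[j]
--         j += 1
-- ===== SOURCE B (Python) =====
-- def solve(A, B):
--     # One pass with a sqrt-decomposed counting array over the compressed values
--     # (instead of the recursive merge-sort cross count); same in-place ascending
--     # sort of A and B at the end.
--     vals = sorted(set(A + B))
--     rank = {v: k for k, v in enumerate(vals)}
--     m = len(vals)
--     bs = 1
--     while bs * bs < m:
--         bs += 1
--     cnt = [0] * m
--     blk = [0] * (m // bs + 1)
--     ans = 0
--     j = 0
--     for a, b in zip(A, B):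
--         r = rank[b]
--         q = r // bs
--         ans += j - (sum(blk[:q]) + sum(cnt[q * bs : r + 1]))
--         cnt[rank[a]] += 1
--         blk[rank[a] // bs] += 1
--         j += 1
--     A.sort()
--     B.sort()
--     return ans
-- ===== Notes on version B (the rewrite author's own statement) =====
-- stated objective: alternative
-- what changed: Replaced the recursive merge-sort divide-and-conquer cross count with a single left-to-right pass that coordinate-compresses the values and keeps a sqrt-decomposed counting array (per-rank counts plus block sums), adding for each j the number of already-seen A[i] greater than B[j]; the in-place ascending sort of A and B is reproduced at the end. …
-- outside the precondition, e.g. on solve([3, 1], [1, 1, 0, 2, -2]): A returns 4, B returns 1; on solve([1, -2], [1, 0, 0, 3]): A returns 2, B returns 1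
import Mathlib
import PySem

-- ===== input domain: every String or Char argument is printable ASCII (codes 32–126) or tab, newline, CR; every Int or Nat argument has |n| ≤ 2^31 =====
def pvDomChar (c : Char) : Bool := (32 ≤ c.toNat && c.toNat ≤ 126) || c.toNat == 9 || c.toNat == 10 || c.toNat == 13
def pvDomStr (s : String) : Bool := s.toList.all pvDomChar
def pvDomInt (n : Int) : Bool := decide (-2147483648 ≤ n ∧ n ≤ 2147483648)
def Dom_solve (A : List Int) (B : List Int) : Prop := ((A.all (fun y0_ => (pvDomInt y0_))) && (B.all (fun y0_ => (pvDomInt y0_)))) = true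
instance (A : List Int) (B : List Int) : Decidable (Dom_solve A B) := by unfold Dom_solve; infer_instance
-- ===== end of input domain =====

-- B re-implements A's merge-sort cross-pair count as one pass over a sqrt-decomposed
-- counting array over compressed values (alternative algorithm, similar cost).
-- Both Pythons sort A and B in place; the equivalence proved here is about the RETURN value.

-- ===== PORT A =====

-- merge(A1, A2, dest): at every call site dest has length len(A1)+len(A2) and is fully
-- overwritten; ported as building the merged list (ties '<' false take from A2 first).
def pyMergeLoop : List Int → List Int → List Int
  | [], ys => ys
  | x :: xs, [] => x :: xs
  | x :: xs, y :: ys =>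
    if x < y then x :: pyMergeLoop xs (y :: ys) else y :: pyMergeLoop (x :: xs) ys

-- the 'for k in range(len_A + len_B)' loop over A1 (xs) and B2 (ys) with its early returns;
-- ans += len_A - index_A is ans += length of the remaining xs.  The catch-all arm is the
-- case where Python raises IndexError (one side empty) — unreachable under Pre_solve.
def countLoop : List Int → List Int → Int → Int
  | x :: xs, y :: ys, ans =>
    if x ≤ y then
      (if xs = [] then ans else countLoop xs (y :: ys) ans)
    else
      (if ys = [] then ans + ((xs.length : Int) + 1)
       else countLoop (x :: xs) ys (ans + ((xs.length : Int) + 1)))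
  | _, _, ans => ans
  termination_by xs ys _ => xs.length + ys.length

-- solve mutates A and B in place and the recursion READS the mutated (sorted) slices,
-- so the port threads them: solveAux returns (return value, final A, final B).
-- mid = len(A)//2 ≥ 0, so A[:mid]/A[mid:] are take/drop (PySem.List.slice_to_natCast /
-- slice_from_natCast).  In the else branch Python does A.sort(); B.sort() with ans = 0,
-- then still runs the loop on the OLD slices and the final merge overwrites all of A and B.
def solveAux (A : List Int) (B : List Int) : Int × List Int × List Int :=
  if _h : A.length ≤ 1 then (0, A, B)
  else
    let mid := A.length / 2
    let A1 := A.take mid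
    let A2 := A.drop mid
    let B1 := B.take mid
    let B2 := B.drop mid
    if 1 ≤ A1.length ∧ 1 ≤ B1.length then
      let r1 := solveAux A1 B1
      let r2 := solveAux A2 B2
      (countLoop r1.2.1 r2.2.2 (r1.1 + r2.1), pyMergeLoop r1.2.1 r2.2.1, pyMergeLoop r1.2.2 r2.2.2)
    else
      (countLoop A1 B2 0, pyMergeLoop A1 A2, pyMergeLoop B1 B2)
  termination_by A.length
  decreasing_by
  · simp only [List.length_take]; omega
  · simp only [List.length_drop]; omega

def solve (A : List Int) (B : List Int) : Int := (solveAux A B).1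

-- ===== PORT B =====

-- 'while bs * bs < m: bs += 1' (all values stay nonnegative, so Nat is exact)
def bsLoop (m : Nat) (bs : Nat) : Nat :=
  if bs * bs < m then bsLoop m (bs + 1) else bs
  termination_by m - bs
  decreasing_by
    have hbs : bs < m := by nlinarith
    omega

-- one iteration of the 'for a, b in zip(A, B)' loop; state = (ans, cnt, blk, j).
-- rank[x] lookups: the key is always present (every a/b is in vals), ported with getD;
-- cnt[r] += 1 / blk[q] += 1 indices are nonnegative and in range, ported with pyGetD/pySetD.
def sqStep (D : PySem.Dict Int Int) (bsI : Int)
    (st : Int × List Int × List Int × Int) (ab : Int × Int) : Int × List Int × List Int × Int :=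
  let r := D.getD ab.2 0
  let q := PySem.Int.floordiv r bsI
  let ans := st.1 + (st.2.2.2 -
      ((PySem.List.slice st.2.2.1 none (some q)).sum +
       (PySem.List.slice st.2.1 (some (q * bsI)) (some (r + 1))).sum))
  let ra := D.getD ab.1 0
  let cnt := PySem.List.pySetD st.2.1 ra (PySem.List.pyGetD st.2.1 ra 0 + 1)
  let blk := PySem.List.pySetD st.2.2.1 (PySem.Int.floordiv ra bsI)
      (PySem.List.pyGetD st.2.2.1 (PySem.Int.floordiv ra bsI) 0 + 1)
  (ans, cnt, blk, st.2.2.2 + 1)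

-- m // bs + 1 on nonnegative ints is Nat division (PySem.Int.floordiv_natCast).
-- The final A.sort(); B.sort() only mutate the arguments, not the return value.
def solve_alt (A : List Int) (B : List Int) : Int :=
  let vals := PySem.List.sorted (PySem.Set.ofList (A ++ B)) (fun x => x) false
  let rank := (PySem.List.enumerate vals 0).foldl (fun d p => d.insert p.2 p.1) PySem.Dict.empty
  let m := vals.length
  let bs := bsLoop m 1
  let st := (A.zip B).foldl (sqStep rank (bs : Int))
      (0, List.replicate m 0, List.replicate (m / bs + 1) 0, 0)
  st.1

-- ===== PRECONDITION & SPEC =====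
-- Pre_ admits len(A) <= 1 (both programs return 0) and len(A) == len(B), the problem's
-- natural domain; it excludes len(A) >= 2 with unequal lengths, where A raises IndexError
-- (len(B) < len(A)) or returns an accidental truncated pair count (len(B) > len(A))
-- determined by slicing both lists at len(A)//2.
def Pre_solve (A : List Int) (B : List Int) : Prop := A.length ≤ 1 ∨ A.length = B.length
instance (A : List Int) (B : List Int) : Decidable (Pre_solve A B) := by unfold Pre_solve; infer_instance
def pvWitness_solve : List Int × List Int := ([2, 1], [1, 2])

def Spec_solve (A : List Int) (B : List Int) (out : Int) : Prop := out = solve_alt A B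
instance (A : List Int) (B : List Int) (out : Int) : Decidable (Spec_solve A B out) := by unfold Spec_solve; infer_instance

-- ===== CLAIM (what is proved, stated in full; the proofs are below) =====
def Claim_equal_solve : Prop := ∀ (A : List Int) (B : List Int), Dom_solve A B → Pre_solve A B → Spec_solve A B (solve A B)

-- ===== LEMMAS AND PROOFS =====

-- the common specification: pvP pre pairs = Σ over pairs (a,b), in order, of
-- #{x ∈ pre ++ (first components already consumed) : x > b}
def pvP : List Int → List (Int × Int) → Int
  | _, [] => 0
  | pre, p :: rest => ((pre.countP fun x => decide (p.2 < x)) : Int) + pvP (pre ++ [p.1]) rest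

def crossI (X Y : List Int) : Int := (Y.map (fun b => ((X.countP fun x => decide (b < x)) : Int))).sum


-- ---------- A-side: merge ----------
lemma pyMergeLoop_perm : ∀ xs ys : List Int, (pyMergeLoop xs ys).Perm (xs ++ ys) := by
  intro xs ys
  induction xs, ys using pyMergeLoop.induct with
  | case1 ys => simp [pyMergeLoop]
  | case2 x xs => simp [pyMergeLoop]
  | case3 x xs y ys h ih =>
      simp only [pyMergeLoop, if_pos h]
      exact (ih.cons x)
  | case4 x xs y ys h ih =>
      simp only [pyMergeLoop, if_neg h]
      exact ((ih.cons y).trans (List.perm_middle).symm)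

lemma mem_pyMergeLoop {z : Int} {xs ys : List Int} (h : z ∈ pyMergeLoop xs ys) :
    z ∈ xs ++ ys := (pyMergeLoop_perm xs ys).mem_iff.mp h

lemma pyMergeLoop_sorted : ∀ xs ys : List Int, xs.Pairwise (· ≤ ·) → ys.Pairwise (· ≤ ·) →
    (pyMergeLoop xs ys).Pairwise (· ≤ ·) := by
  intro xs ys hx hy
  induction xs, ys using pyMergeLoop.induct with
  | case1 ys => simpa [pyMergeLoop] using hy
  | case2 x xs => simpa [pyMergeLoop] using hx
  | case3 x xs y ys h ih =>
      simp only [pyMergeLoop, if_pos h]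
      rw [List.pairwise_cons] at hx ⊢
      refine ⟨?_, ih hx.2 hy⟩
      intro z hz
      rcases (List.mem_append.mp (mem_pyMergeLoop hz)) with hz | hz
      · exact hx.1 z hz
      · rcases List.mem_cons.mp hz with rfl | hz
        · exact le_of_lt h
        · exact le_trans (le_of_lt h) ((List.pairwise_cons.mp hy).1 z hz)
  | case4 x xs y ys h ih =>
      simp only [pyMergeLoop, if_neg h]
      rw [List.pairwise_cons] at hy ⊢
      refine ⟨?_, ih hx hy.2⟩
      intro z hz
      rcases (List.mem_append.mp (mem_pyMergeLoop hz)) with hz | hz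
      · rcases List.mem_cons.mp hz with rfl | hz
        · exact le_of_not_gt h
        · exact le_trans (le_of_not_gt h) ((List.pairwise_cons.mp hx).1 z hz)
      · exact hy.1 z hz

-- ---------- crossI ----------
lemma crossI_nil_left (Y : List Int) : crossI [] Y = 0 := by
  simp [crossI]

lemma crossI_nil_right (X : List Int) : crossI X [] = 0 := by
  simp [crossI]

lemma crossI_cons_right (X : List Int) (y : Int) (Y : List Int) :
    crossI X (y :: Y) = ((X.countP fun x => decide (y < x)) : Int) + crossI X Y := by
  simp [crossI]

lemma crossI_cons_left_drop {x : Int} {X Y : List Int} (h : ∀ b ∈ Y, ¬ b < x) :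
    crossI (x :: X) Y = crossI X Y := by
  unfold crossI
  congr 1
  apply List.map_congr_left
  intro b hb
  have : (decide (b < x)) = false := by simp [h b hb]
  simp [this]

lemma crossI_perm_left {X X' : List Int} (h : X.Perm X') (Y : List Int) :
    crossI X Y = crossI X' Y := by
  unfold crossI
  congr 1
  apply List.map_congr_left
  intro b _
  rw [h.countP_eq]

lemma crossI_perm_right {Y Y' : List Int} (X : List Int) (h : Y.Perm Y') :
    crossI X Y = crossI X Y' := (h.map _).sum_eq

-- ---------- countLoop computes crossI on sorted inputs ----------
lemma countLoop_eq : ∀ (n : Nat) (X Y : List Int) (ans : Int),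
    X.length + Y.length ≤ n → X.Pairwise (· ≤ ·) → Y.Pairwise (· ≤ ·) →
    countLoop X Y ans = ans + crossI X Y := by
  intro n
  induction n with
  | zero =>
      intro X Y ans hn _ _
      have hX : X = [] := by cases X <;> simp_all
      subst hX
      simp [countLoop, crossI_nil_left]
  | succ n ih =>
      intro X Y ans hn hX hY
      match X, Y with
      | [], Y => simp [countLoop, crossI_nil_left]
      | x :: xs, [] => simp [countLoop, crossI_nil_right]
      | x :: xs, y :: ys =>
          rw [countLoop]
          by_cases hxy : x ≤ y
          · rw [if_pos hxy]
            have hdrop : crossI (x :: xs) (y :: ys) = crossI xs (y :: ys) := by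
              apply crossI_cons_left_drop
              intro b hb
              rcases List.mem_cons.mp hb with rfl | hb
              · omega
              · have := (List.pairwise_cons.mp hY).1 b hb
                omega
            rw [hdrop]
            by_cases hxs : xs = []
            · subst hxs
              simp [crossI_nil_left]
            · rw [if_neg hxs]
              apply ih
              · simp at hn ⊢; omega
              · exact (List.pairwise_cons.mp hX).2
              · exact hY
          · rw [if_neg hxy]
            have hcnt : ((x :: xs).countP fun z => decide (y < z)) = xs.length + 1 := by
              have : ((x :: xs).countP fun z => decide (y < z)) = (x :: xs).length := by
                apply List.countP_eq_length.mpr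
                intro z hz
                rcases List.mem_cons.mp hz with rfl | hz
                · simp; omega
                · have := (List.pairwise_cons.mp hX).1 z hz
                  simp; omega
              simpa using this
            by_cases hys : ys = []
            · subst hys
              rw [if_pos rfl]
              rw [crossI_cons_right, crossI_nil_right, hcnt]
              push_cast
              ring
            · rw [if_neg hys]
              rw [ih _ _ _ (by simp at hn ⊢; omega) hX (List.pairwise_cons.mp hY).2]
              rw [crossI_cons_right, hcnt]
              push_cast
              ring

-- ---------- pvP algebra ----------
lemma pvP_append_pairs : ∀ (l1 l2 : List (Int × Int)) (pre : List Int),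
    pvP pre (l1 ++ l2) = pvP pre l1 + pvP (pre ++ l1.map (·.1)) l2 := by
  intro l1
  induction l1 with
  | nil => intro l2 pre; simp [pvP]
  | cons p rest ih =>
      intro l2 pre
      simp only [List.cons_append, pvP, ih, List.map_cons, List.append_assoc, List.cons_append,
        List.nil_append]
      ring

lemma pvP_pre_append : ∀ (l : List (Int × Int)) (p q : List Int),
    pvP (p ++ q) l = crossI p (l.map (·.2)) + pvP q l := by
  intro l
  induction l with
  | nil => intro p q; simp [pvP, crossI_nil_right]
  | cons ab rest ih =>
      intro p q
      simp only [pvP, List.countP_append, List.map_cons, crossI_cons_right]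
      rw [List.append_assoc]
      rw [ih p (q ++ [ab.1])]
      push_cast
      ring

lemma pvP_pre (l : List (Int × Int)) (p : List Int) :
    pvP p l = crossI p (l.map (·.2)) + pvP [] l := by
  have := pvP_pre_append l p []
  simpa using this


-- ---------- A-side main invariant ----------
lemma solveAux_spec : ∀ (n : Nat) (A B : List Int), A.length ≤ n → A.length = B.length →
    (solveAux A B).1 = pvP [] (A.zip B)
    ∧ (solveAux A B).2.1.Perm A ∧ (solveAux A B).2.1.Pairwise (· ≤ ·)
    ∧ (solveAux A B).2.2.Perm B ∧ (solveAux A B).2.2.Pairwise (· ≤ ·) := by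
  intro n
  induction n with
  | zero =>
      intro A B hn hlen
      have hA : A = [] := by cases A <;> simp_all
      have hB : B = [] := by cases B <;> simp_all
      subst hA; subst hB
      simp [solveAux, pvP]
  | succ n ih =>
      intro A B hn hlen
      by_cases h1 : A.length ≤ 1
      · rw [solveAux, dif_pos h1]
        match A, B, hlen with
        | [], [], _ => simp [pvP]
        | [a], [b], _ => simp [pvP]
      · rw [solveAux, dif_neg h1]
        simp only []
        set mid := A.length / 2 with hmid
        have hmid1 : 1 ≤ mid := by omega
        have hmidlt : mid < A.length := by omega
        have hlenA1 : (A.take mid).length = mid := by simp; omega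
        have hlenB1 : (B.take mid).length = mid := by simp; omega
        have hlenA2 : (A.drop mid).length = A.length - mid := by simp
        have hlenB2 : (B.drop mid).length = A.length - mid := by simp; omega
        have hguard : 1 ≤ (A.take mid).length ∧ 1 ≤ (B.take mid).length := by omega
        rw [if_pos hguard]
        have ih1 := ih (A.take mid) (B.take mid) (by omega) (by omega)
        have ih2 := ih (A.drop mid) (B.drop mid) (by omega) (by omega)
        obtain ⟨e1, pA1, sA1, pB1, sB1⟩ := ih1
        obtain ⟨e2, pA2, sA2, pB2, sB2⟩ := ih2
        set r1 := solveAux (A.take mid) (B.take mid)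
        set r2 := solveAux (A.drop mid) (B.drop mid)
        have hzip : A.zip B = (A.take mid).zip (B.take mid) ++ (A.drop mid).zip (B.drop mid) := by
          conv_lhs => rw [← List.take_append_drop mid A, ← List.take_append_drop mid B]
          exact List.zip_append (by omega)
        have hmapfst : ((A.take mid).zip (B.take mid)).map Prod.fst = A.take mid :=
          List.map_fst_zip (by omega)
        have hmapsnd : ((A.drop mid).zip (B.drop mid)).map Prod.snd = B.drop mid :=
          List.map_snd_zip (by omega)
        have hmapfst' : ((A.take mid).zip (B.take mid)).map (fun p => p.1) = A.take mid := by
          simpa using hmapfst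
        have hmapsnd' : ((A.drop mid).zip (B.drop mid)).map (fun p => p.2) = B.drop mid := by
          simpa using hmapsnd
        refine ⟨?_, ?_, ?_, ?_, ?_⟩
        · -- the count
          show countLoop r1.2.1 r2.2.2 (r1.1 + r2.1) = _
          rw [countLoop_eq (r1.2.1.length + r2.2.2.length) _ _ _ le_rfl sA1 sB2]
          rw [crossI_perm_left pA1, crossI_perm_right _ pB2]
          rw [hzip, pvP_append_pairs, List.nil_append, hmapfst']
          rw [pvP_pre ((A.drop mid).zip (B.drop mid)) (A.take mid), hmapsnd']
          rw [e1, e2]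
          ring
        · exact (pyMergeLoop_perm _ _).trans
            ((pA1.append pA2).trans (by rw [List.take_append_drop]))
        · exact pyMergeLoop_sorted _ _ sA1 sA2
        · exact (pyMergeLoop_perm _ _).trans
            ((pB1.append pB2).trans (by rw [List.take_append_drop]))
        · exact pyMergeLoop_sorted _ _ sB1 sB2

lemma solve_eq_pvP (A B : List Int) (hlen : A.length = B.length) :
    solve A B = pvP [] (A.zip B) :=
  (solveAux_spec A.length A B le_rfl hlen).1


-- ---------- B-side helpers ----------
def pvCnt (V : List Int) (pa : List Int) : List Int :=
  (List.range V.length).map (fun r => ((pa.countP fun x => decide (V.idxOf x = r)) : Int))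

def pvBlk (V : List Int) (bs : Nat) (pa : List Int) : List Int :=
  (List.range (V.length / bs + 1)).map (fun q => ((pa.countP fun x => decide (V.idxOf x / bs = q)) : Int))

lemma range_drop (m n : Nat) : (List.range m).drop n = List.range' n (m - n) := by
  apply List.ext_getElem
  · simp
  · intro i h1 h2
    simp [List.getElem_drop]

lemma range'_take (s len k : Nat) (h : k ≤ len) : (List.range' s len).take k = List.range' s k := by
  apply List.ext_getElem
  · simp; omega
  · intro i h1 h2
    simp [List.getElem_take]

lemma countP_split : ∀ (pa : List Int) (p q r : Int → Bool),
    (∀ x ∈ pa, (r x = (p x || q x)) ∧ ¬(p x = true ∧ q x = true)) →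
    pa.countP p + pa.countP q = pa.countP r := by
  intro pa p q r h
  induction pa with
  | nil => simp
  | cons y ys ih =>
      simp only [List.countP_cons]
      have hy := h y (by simp)
      have hys := ih (fun x hx => h x (by simp [hx]))
      rw [hy.1]
      cases hp : p y <;> cases hq : q y
      · simp [hp, hq]; try omega
      · simp [hp, hq]; try omega
      · simp [hp, hq]; try omega
      · exact absurd ⟨hp, hq⟩ hy.2

lemma sum_map_range'_count (pa : List Int) (f : Int → Nat) : ∀ (len lo : Nat),
    ((List.range' lo len).map (fun r => ((pa.countP fun x => decide (f x = r)) : Int))).sum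
      = ((pa.countP fun x => decide (lo ≤ f x ∧ f x < lo + len)) : Int) := by
  intro len
  induction len with
  | zero =>
      intro lo
      have h0 : pa.countP (fun x => decide (lo ≤ f x ∧ f x < lo + 0)) = 0 :=
        List.countP_eq_zero.mpr (by intro x _; simp only [decide_eq_true_eq]; omega)
      simp only [List.range'_zero, List.map_nil, List.sum_nil]
      rw [h0]
      simp
  | succ n ih =>
      intro lo
      rw [List.range'_succ]
      simp only [List.map_cons, List.sum_cons]
      rw [ih (lo + 1)]
      have hsplit := countP_split pa (fun x => decide (f x = lo))
        (fun x => decide (lo + 1 ≤ f x ∧ f x < lo + 1 + n))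
        (fun x => decide (lo ≤ f x ∧ f x < lo + (n + 1)))
        (by
          intro x _
          constructor
          · rw [← Bool.decide_or, decide_eq_decide]
            omega
          · simp only [decide_eq_true_eq]
            omega)
      omega

lemma sum_take_pvBlk (V : List Int) (bs : Nat) (pa : List Int) (t : Nat)
    (ht : t ≤ V.length / bs + 1) :
    ((pvBlk V bs pa).take t).sum = ((pa.countP fun x => decide (V.idxOf x / bs < t)) : Int) := by
  unfold pvBlk
  rw [← List.map_take, List.take_range]
  have : min t (V.length / bs + 1) = t := by omega
  rw [this, List.range_eq_range']
  rw [sum_map_range'_count pa (fun x => V.idxOf x / bs) t 0]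
  congr 1
  apply List.countP_congr
  intro x _
  simp only [decide_eq_true_eq]
  generalize V.idxOf x / bs = y
  omega

lemma sum_drop_take_pvCnt (V : List Int) (pa : List Int) (lo hi : Nat) (hhi : hi ≤ V.length) :
    (((pvCnt V pa).drop lo).take (hi - lo)).sum
      = ((pa.countP fun x => decide (lo ≤ V.idxOf x ∧ V.idxOf x < hi)) : Int) := by
  unfold pvCnt
  rw [← List.map_drop, range_drop, ← List.map_take, range'_take _ _ _ (by omega)]
  rw [sum_map_range'_count pa (fun x => V.idxOf x) (hi - lo) lo]
  congr 1
  apply List.countP_congr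
  intro x _
  simp only [decide_eq_true_eq]
  omega

lemma idx_lt_iff {V : List Int} (hV : V.Pairwise (· < ·)) {i j : Nat}
    (hi : i < V.length) (hj : j < V.length) : V[i] < V[j] ↔ i < j := by
  constructor
  · intro h
    rcases Nat.lt_trichotomy i j with hij | hij | hij
    · exact hij
    · subst hij; omega
    · have := List.pairwise_iff_getElem.mp hV j i hj hi hij
      omega
  · intro h
    exact List.pairwise_iff_getElem.mp hV i j hi hj h

lemma rank_getD (vals : List Int) (hnd : vals.Nodup) (k : Nat) (hk : k < vals.length) :
    ((PySem.List.enumerate vals 0).foldl (fun d p => d.insert p.2 p.1)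
        PySem.Dict.empty).getD vals[k] 0 = (k : Int) := by
  have hitems := PySem.Dict.items_foldl_insert_fresh (PySem.List.enumerate vals 0)
    (fun p => p.2) (fun p => p.1) PySem.Dict.empty
    (fun a _ => PySem.Dict.contains_empty _)
    (by rw [PySem.List.map_snd_enumerate]; exact hnd)
  have hkeys : ((PySem.List.enumerate vals 0).foldl (fun d p => d.insert p.2 p.1)
      PySem.Dict.empty).keys.Nodup :=
    PySem.Dict.nodup_keys_foldl_insert_key (PySem.List.enumerate vals 0)
      (fun p : Int × Int => p.2) (fun _ p => p.1) PySem.Dict.empty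
      PySem.Dict.nodup_keys_empty
  have hlen : k < (PySem.List.enumerate vals 0).length := by
    rw [PySem.List.length_enumerate]; exact hk
  have hmem : (vals[k], (k : Int)) ∈ ((PySem.List.enumerate vals 0).foldl
      (fun d p => d.insert p.2 p.1) PySem.Dict.empty).items := by
    rw [hitems]
    apply List.mem_append_right
    apply List.mem_map.mpr
    refine ⟨(PySem.List.enumerate vals 0)[k], List.getElem_mem hlen, ?_⟩
    rw [PySem.List.getElem_enumerate]
    simp
  have hget := PySem.Dict.get?_of_mem_items _ hmem hkeys
  simp [PySem.Dict.getD, hget]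

lemma bsLoop_ge_aux : ∀ (fuel m bs : Nat), m - bs ≤ fuel → bs ≤ bsLoop m bs := by
  intro fuel
  induction fuel with
  | zero =>
      intro m bs h
      rw [bsLoop]
      split
      · rename_i hlt
        have : bs < m := by nlinarith
        omega
      · exact le_rfl
  | succ n ih =>
      intro m bs h
      rw [bsLoop]
      split
      · rename_i hlt
        have hbm : bs < m := by nlinarith
        exact le_trans (Nat.le_succ bs) (ih m (bs + 1) (by omega))
      · exact le_rfl

lemma bsLoop_ge (m bs : Nat) : bs ≤ bsLoop m bs := bsLoop_ge_aux (m - bs) m bs le_rfl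


lemma block_split_arith (bs kb i di dk pdi pdk mi : Nat)
    (f1 : pdi + mi = i) (f2 : mi < bs) (f3 : pdk ≤ kb)
    (f4 : dk ≤ di ↔ pdk ≤ i) (f5 : i ≤ kb → di ≤ dk)
    (f6 : di < dk → pdi + bs ≤ pdk) (f7 : di = dk → pdi = pdk) :
    (i ≤ kb ↔ (di < dk ∨ (pdk ≤ i ∧ i < kb + 1))) ∧ ¬(di < dk ∧ (pdk ≤ i ∧ i < kb + 1)) := by
  omega

lemma div_block_split (bs kb i : Nat) (hbs : 1 ≤ bs) :
    (i ≤ kb ↔ (i / bs < kb / bs ∨ (kb / bs * bs ≤ i ∧ i < kb + 1)))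
    ∧ ¬(i / bs < kb / bs ∧ (kb / bs * bs ≤ i ∧ i < kb + 1)) := by
  refine block_split_arith bs kb i (i / bs) (kb / bs) (i / bs * bs) (kb / bs * bs) (i % bs)
    ?_ ?_ ?_ ?_ ?_ ?_ ?_
  · exact Nat.div_add_mod' i bs
  · exact Nat.mod_lt i (show 0 < bs by omega)
  · exact Nat.div_mul_le_self kb bs
  · exact Nat.le_div_iff_mul_le (k := bs) (show 0 < bs by omega)
  · exact fun h => Nat.div_le_div_right h
  · intro h
    have h1 : (i / bs + 1) * bs ≤ (kb / bs) * bs := Nat.mul_le_mul_right bs (by omega)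
    have h2 : (i / bs + 1) * bs = i / bs * bs + bs := by ring
    omega
  · intro h
    rw [h]

lemma query_eq (V : List Int) (bs : Nat) (pa : List Int) (hbs : 1 ≤ bs)
    (kb : Nat) (hkb : kb < V.length) :
    ((pvBlk V bs pa).take (kb / bs)).sum
      + (((pvCnt V pa).drop (kb / bs * bs)).take (kb + 1 - kb / bs * bs)).sum
      = ((pa.countP fun x => decide (V.idxOf x ≤ kb)) : Int) := by
  have hble : kb / bs ≤ V.length / bs + 1 :=
    le_trans (Nat.div_le_div_right (le_of_lt hkb)) (Nat.le_succ _)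
  rw [sum_take_pvBlk V bs pa (kb / bs) hble]
  rw [sum_drop_take_pvCnt V pa (kb / bs * bs) (kb + 1) (by omega)]
  have hsplit := countP_split pa
    (fun x => decide (V.idxOf x / bs < kb / bs))
    (fun x => decide (kb / bs * bs ≤ V.idxOf x ∧ V.idxOf x < kb + 1))
    (fun x => decide (V.idxOf x ≤ kb))
    (by
      intro x _
      obtain ⟨hiff, hdisj⟩ := div_block_split bs kb (V.idxOf x) hbs
      constructor
      · rw [← Bool.decide_or, decide_eq_decide]
        exact hiff
      · simp only [decide_eq_true_eq]
        exact hdisj)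
  omega

lemma pvCnt_set (V : List Int) (pa : List Int) (a : Int) (ha : a ∈ V) :
    (pvCnt V pa).set (V.idxOf a) ((pvCnt V pa).getD (V.idxOf a) 0 + 1) = pvCnt V (pa ++ [a]) := by
  have hka : V.idxOf a < V.length := List.idxOf_lt_length_of_mem ha
  have hget : (pvCnt V pa).getD (V.idxOf a) 0
      = ((pa.countP fun x => decide (V.idxOf x = V.idxOf a)) : Int) := by
    rw [List.getD_eq_getElem _ _ (by simp [pvCnt]; omega)]
    simp [pvCnt]
  rw [hget]
  apply List.ext_getElem
  · simp [pvCnt]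
  · intro i h1 h2
    rw [List.getElem_set]
    simp only [pvCnt, List.getElem_map, List.getElem_range,
      List.countP_append]
    by_cases hi : V.idxOf a = i
    · rw [if_pos hi]
      have : (List.countP (fun x => decide (V.idxOf x = i)) [a]) = 1 := by
        simp [hi]
      rw [this]
      subst hi
      push_cast
      ring
    · rw [if_neg hi]
      have : (List.countP (fun x => decide (V.idxOf x = i)) [a]) = 0 := by
        simp [hi]
      rw [this]
      push_cast
      ring

lemma pvBlk_set (V : List Int) (bs : Nat) (pa : List Int) (a : Int) (ha : a ∈ V) :
    (pvBlk V bs pa).set (V.idxOf a / bs) ((pvBlk V bs pa).getD (V.idxOf a / bs) 0 + 1)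
      = pvBlk V bs (pa ++ [a]) := by
  have hka : V.idxOf a < V.length := List.idxOf_lt_length_of_mem ha
  have hlt : V.idxOf a / bs < V.length / bs + 1 := by
    have := Nat.div_le_div_right (c := bs) (le_of_lt hka)
    omega
  have hget : (pvBlk V bs pa).getD (V.idxOf a / bs) 0
      = ((pa.countP fun x => decide (V.idxOf x / bs = V.idxOf a / bs)) : Int) := by
    rw [List.getD_eq_getElem _ _ (by simp [pvBlk]; omega)]
    simp [pvBlk]
  rw [hget]
  apply List.ext_getElem
  · simp [pvBlk]
  · intro i h1 h2
    rw [List.getElem_set]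
    simp only [pvBlk, List.getElem_map, List.getElem_range, List.countP_append]
    by_cases hi : V.idxOf a / bs = i
    · rw [if_pos hi]
      have : (List.countP (fun x => decide (V.idxOf x / bs = i)) [a]) = 1 := by
        simp [hi]
      rw [this]
      subst hi
      push_cast
      ring
    · rw [if_neg hi]
      have : (List.countP (fun x => decide (V.idxOf x / bs = i)) [a]) = 0 := by
        simp [hi]
      rw [this]
      push_cast
      ring

lemma sqStep_eq (V : List Int) (hV : V.Pairwise (· < ·))
    (D : PySem.Dict Int Int)
    (hD : ∀ (k : Nat) (hk : k < V.length), D.getD (V[k]'hk) 0 = (k : Int))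
    (bs : Nat) (hbs : 1 ≤ bs)
    (pa : List Int) (a b : Int) (ha : a ∈ V) (hb : b ∈ V)
    (hpa : ∀ x ∈ pa, x ∈ V) (ans : Int) :
    sqStep D (bs : Int) (ans, pvCnt V pa, pvBlk V bs pa, (pa.length : Int)) (a, b)
      = (ans + ((pa.countP fun x => decide (b < x)) : Int),
         pvCnt V (pa ++ [a]), pvBlk V bs (pa ++ [a]), ((pa ++ [a]).length : Int)) := by
  have hkb : V.idxOf b < V.length := List.idxOf_lt_length_of_mem hb
  have hka : V.idxOf a < V.length := List.idxOf_lt_length_of_mem ha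
  have hVb : V[V.idxOf b]'hkb = b := List.getElem_idxOf hkb
  have hVa : V[V.idxOf a]'hka = a := List.getElem_idxOf hka
  have hrb : D.getD b 0 = ((V.idxOf b : Nat) : Int) := by
    have h := hD _ hkb; rwa [hVb] at h
  have hra : D.getD a 0 = ((V.idxOf a : Nat) : Int) := by
    have h := hD _ hka; rwa [hVa] at h
  set kb := V.idxOf b with hkbdef
  set ka := V.idxOf a with hkadef
  unfold sqStep
  simp only [hrb, hra, PySem.Int.floordiv_natCast, PySem.List.pyGetD_natCast,
    PySem.List.pySetD_natCast, PySem.List.slice_to_natCast]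
  have e1 : ((kb / bs : Nat) : Int) * ((bs : Nat) : Int) = ((kb / bs * bs : Nat) : Int) := by
    push_cast; ring
  have e2 : ((kb : Nat) : Int) + 1 = ((kb + 1 : Nat) : Int) := by push_cast; ring
  rw [e1, e2, PySem.List.slice_natCast]
  rw [query_eq V bs pa hbs kb hkb]
  rw [pvCnt_set V pa a ha, pvBlk_set V bs pa a ha]
  simp only [Prod.mk.injEq]
  refine ⟨?_, by trivial, by trivial,
    by simp [List.length_append]; try push_cast; try ring⟩
  have hgt : (pa.countP fun x => decide (kb < V.idxOf x)) = (pa.countP fun x => decide (b < x)) := by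
    apply List.countP_congr
    intro x hx
    have hxV := hpa x hx
    have hix : V.idxOf x < V.length := List.idxOf_lt_length_of_mem hxV
    have hVx : V[V.idxOf x]'hix = x := List.getElem_idxOf hix
    simp only [decide_eq_true_eq]
    constructor
    · intro h
      have h2 := (idx_lt_iff hV hkb hix).mpr h
      rwa [hVb, hVx] at h2
    · intro h
      have h2 : V[kb]'hkb < V[V.idxOf x]'hix := by rw [hVb, hVx]; exact h
      exact (idx_lt_iff hV hkb hix).mp h2
  have htot := countP_split pa (fun x => decide (V.idxOf x ≤ kb))
    (fun x => decide (kb < V.idxOf x)) (fun _ => true)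
    (by
      intro x _
      constructor
      · rw [← Bool.decide_or]
        symm
        simp only [decide_eq_true_eq]
        omega
      · simp only [decide_eq_true_eq]
        omega)
  rw [List.countP_true] at htot
  rw [← hgt]
  omega


lemma sqFold (V : List Int) (hV : V.Pairwise (· < ·)) (D : PySem.Dict Int Int)
    (hD : ∀ (k : Nat) (hk : k < V.length), D.getD (V[k]'hk) 0 = (k : Int))
    (bs : Nat) (hbs : 1 ≤ bs) :
    ∀ (pairs : List (Int × Int)) (pa : List Int) (ans : Int),
      (∀ p ∈ pairs, p.1 ∈ V ∧ p.2 ∈ V) → (∀ x ∈ pa, x ∈ V) →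
      pairs.foldl (sqStep D (bs : Int)) (ans, pvCnt V pa, pvBlk V bs pa, (pa.length : Int))
        = (ans + pvP pa pairs, pvCnt V (pa ++ pairs.map (·.1)),
           pvBlk V bs (pa ++ pairs.map (·.1)), ((pa ++ pairs.map (·.1)).length : Int)) := by
  intro pairs
  induction pairs with
  | nil => intro pa ans _ _; simp [pvP]
  | cons p rest ih =>
      intro pa ans hmem hpa
      obtain ⟨a, b⟩ := p
      have hab := hmem (a, b) (by simp)
      rw [List.foldl_cons]
      rw [sqStep_eq V hV D hD bs hbs pa a b hab.1 hab.2 hpa ans]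
      rw [ih (pa ++ [a]) _ (fun q hq => hmem q (by simp [hq]))
        (by
          intro x hx
          rcases List.mem_append.mp hx with hx | hx
          · exact hpa x hx
          · rcases List.mem_singleton.mp hx with rfl
            exact hab.1)]
      simp only [pvP, List.map_cons, List.append_assoc, List.singleton_append,
        Prod.mk.injEq]
      exact ⟨by ring, trivial⟩

lemma solve_alt_eq (A B : List Int) : solve_alt A B = pvP [] (A.zip B) := by
  simp only [solve_alt]
  set V := PySem.List.sorted (PySem.Set.ofList (A ++ B)) (fun x => x) false with hVdef
  have hVlt : V.Pairwise (· < ·) := PySem.List.sorted_ofList_pairwise_lt (A ++ B)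
  have hVnd : V.Nodup := List.Pairwise.imp (fun h => ne_of_lt h) hVlt
  have hmemV : ∀ x ∈ A ++ B, x ∈ V := by
    intro x hx
    rw [hVdef, PySem.List.mem_sorted]
    exact (PySem.Set.mem_ofList _ _).mpr hx
  have hD : ∀ (k : Nat) (hk : k < V.length),
      ((PySem.List.enumerate V 0).foldl (fun d p => d.insert p.2 p.1)
        PySem.Dict.empty).getD (V[k]'hk) 0 = (k : Int) :=
    fun k hk => rank_getD V hVnd k hk
  have hbs1 : 1 ≤ bsLoop V.length 1 := bsLoop_ge V.length 1
  have hcnt0 : List.replicate V.length (0 : Int) = pvCnt V [] := by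
    simp [pvCnt]
  have hblk0 : List.replicate (V.length / bsLoop V.length 1 + 1) (0 : Int)
      = pvBlk V (bsLoop V.length 1) [] := by
    simp [pvBlk]
  have hmemzip : ∀ p ∈ A.zip B, p.1 ∈ V ∧ p.2 ∈ V := by
    intro p hp
    obtain ⟨a, b⟩ := p
    have hz := List.of_mem_zip hp
    exact ⟨hmemV a (List.mem_append_left _ hz.1), hmemV b (List.mem_append_right _ hz.2)⟩
  have hfold := sqFold V hVlt _ hD (bsLoop V.length 1) hbs1 (A.zip B) [] 0 hmemzip
    (by intro x hx; simp at hx)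
  simp only [List.length_nil, Nat.cast_zero, List.nil_append, zero_add] at hfold
  rw [hcnt0, hblk0, hfold]

lemma solve_small (A B : List Int) (h : A.length ≤ 1) : solve A B = 0 := by
  unfold solve
  rw [solveAux, dif_pos h]

lemma solve_alt_small (A B : List Int) (h : A.length ≤ 1) : solve_alt A B = 0 := by
  rw [solve_alt_eq]
  match A, h with
  | [], _ => simp [pvP]
  | [a], _ =>
      match B with
      | [] => simp [pvP]
      | b :: bs => simp [pvP]

theorem solve_spec : Claim_equal_solve := by
  intro A B _ hpre
  show solve A B = solve_alt A B
  rcases hpre with h | h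
  · rw [solve_small A B h, solve_alt_small A B h]
  · rw [solve_eq_pvP A B h, solve_alt_eq]
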